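-- pv_equiv track=rewrite | github.com/essteec/music-attribute-prediction | models/feature_selection_rfe.py | analyze_feature_groups
-- ===== SOURCE A (Python) =====
-- FEATURE_GROUPS = {
--     'audio': list(range(0, 23)),  # 23 audio features (including artist)
--     'text': list(range(23, 28)),  # 5 text stats
--     'sentiment': list(range(28, 30)),  # 2 sentiment features
--     'embeddings': list(range(30, 414))  # 384 embedding dimensions
-- }
--
-- def analyze_feature_groups(feature_indices):
--     """Analyze which feature groups are represented"""
--     groups_count = {
--         'audio': sum(1 for i in feature_indices if i in FEATURE_GROUPS['audio']),
--         'text': sum(1 for i in feature_indices if i in FEATURE_GROUPS['text']),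
--         'sentiment': sum(1 for i in feature_indices if i in FEATURE_GROUPS['sentiment']),
--         'embeddings': sum(1 for i in feature_indices if i in FEATURE_GROUPS['embeddings'])
--     }
--     return groups_count
-- ===== SOURCE B (Python) =====
-- def analyze_feature_groups(feature_indices):
--     """Analyze which feature groups are represented"""
--     audio = text = sentiment = embeddings = 0
--     for i in feature_indices:
--         if 0 <= i < 23:
--             audio += 1
--         elif 23 <= i < 28:
--             text += 1
--         elif 28 <= i < 30:
--             sentiment += 1
--         elif 30 <= i < 414:
--             embeddings += 1
--     return {'audio': audio, 'text': text, 'sentiment': sentiment, 'embeddings': embeddings}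
-- ===== Notes on version B (the rewrite author's own statement) =====
-- stated objective: faster
-- what changed: Replaced the four per-element linear scans over materialized range lists with a single pass using O(1) range-boundary comparisons and four counters.
import Mathlib
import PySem

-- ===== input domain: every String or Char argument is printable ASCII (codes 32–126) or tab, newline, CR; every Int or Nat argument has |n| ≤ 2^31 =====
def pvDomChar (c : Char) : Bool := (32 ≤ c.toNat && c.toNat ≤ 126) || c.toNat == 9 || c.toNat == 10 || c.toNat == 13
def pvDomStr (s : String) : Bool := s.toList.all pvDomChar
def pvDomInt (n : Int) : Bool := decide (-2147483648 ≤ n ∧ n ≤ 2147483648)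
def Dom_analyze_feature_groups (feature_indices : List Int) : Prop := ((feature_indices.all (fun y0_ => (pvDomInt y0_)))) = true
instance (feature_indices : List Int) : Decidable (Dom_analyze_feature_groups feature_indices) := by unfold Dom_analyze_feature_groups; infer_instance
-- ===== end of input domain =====

-- B replaces A's per-element membership scans of materialized range lists by one pass with O(1) boundary comparisons (objective: faster).

-- ===== PORT A =====
-- the module-level FEATURE_GROUPS dict: each value is list(range(a, b))
def pvFG_audio : List Int := PySem.List.pyRange 0 23 1
def pvFG_text : List Int := PySem.List.pyRange 23 28 1
def pvFG_sentiment : List Int := PySem.List.pyRange 28 30 1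
def pvFG_embeddings : List Int := PySem.List.pyRange 30 414 1

-- sum(1 for i in feature_indices if i in grp)
def pvSumIn (feature_indices : List Int) (grp : List Int) : Int :=
  feature_indices.foldl (fun acc i => if grp.contains i then acc + 1 else acc) 0

def analyze_feature_groups (feature_indices : List Int) : List (String × Int) :=
  [("audio", pvSumIn feature_indices pvFG_audio),
   ("text", pvSumIn feature_indices pvFG_text),
   ("sentiment", pvSumIn feature_indices pvFG_sentiment),
   ("embeddings", pvSumIn feature_indices pvFG_embeddings)]

-- ===== PORT B =====
-- one loop step: O(1) boundary comparisons updating the four counters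
def pvStep (c : Int × Int × Int × Int) (i : Int) : Int × Int × Int × Int :=
  if 0 ≤ i ∧ i < 23 then (c.1 + 1, c.2.1, c.2.2.1, c.2.2.2)
  else if 23 ≤ i ∧ i < 28 then (c.1, c.2.1 + 1, c.2.2.1, c.2.2.2)
  else if 28 ≤ i ∧ i < 30 then (c.1, c.2.1, c.2.2.1 + 1, c.2.2.2)
  else if 30 ≤ i ∧ i < 414 then (c.1, c.2.1, c.2.2.1, c.2.2.2 + 1)
  else c

def analyze_feature_groups_alt (feature_indices : List Int) : List (String × Int) :=
  let st := feature_indices.foldl pvStep (0, 0, 0, 0)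
  [("audio", st.1), ("text", st.2.1), ("sentiment", st.2.2.1), ("embeddings", st.2.2.2)]

-- ===== PRECONDITION & SPEC =====
def Spec_analyze_feature_groups (feature_indices : List Int) (out : List (String × Int)) : Prop := out = analyze_feature_groups_alt feature_indices
instance (feature_indices : List Int) (out : List (String × Int)) : Decidable (Spec_analyze_feature_groups feature_indices out) := by unfold Spec_analyze_feature_groups; infer_instance

-- ===== CLAIM (what is proved, stated in full; the proofs are below) =====
def Claim_equal_analyze_feature_groups : Prop := ∀ (feature_indices : List Int), Dom_analyze_feature_groups feature_indices → Spec_analyze_feature_groups feature_indices (analyze_feature_groups feature_indices)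

-- ===== LEMMAS AND PROOFS =====

theorem pvContains_range (a b i : Int) :
    (PySem.List.pyRange a b 1).contains i = decide (a ≤ i ∧ i < b) := by
  simp [PySem.List.mem_pyRange_one]

theorem pvSumIn_shift (l : List Int) (grp : List Int) (c : Int) :
    l.foldl (fun acc i => if grp.contains i then acc + 1 else acc) c
      = c + pvSumIn l grp := by
  induction l generalizing c with
  | nil => simp [pvSumIn]
  | cons x xs ih =>
      simp only [pvSumIn, List.foldl_cons]
      rw [ih, ih]
      split <;> omega

theorem pvSumIn_cons (x : Int) (xs : List Int) (grp : List Int) :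
    pvSumIn (x :: xs) grp
      = (if grp.contains x then (1:Int) else 0) + pvSumIn xs grp := by
  simp only [pvSumIn, List.foldl_cons]
  rw [pvSumIn_shift]
  split <;> simp only [zero_add] <;> rfl

theorem pvCnt_audio (x : Int) (xs : List Int) :
    pvSumIn (x :: xs) pvFG_audio
      = (if 0 ≤ x ∧ x < 23 then (1:Int) else 0) + pvSumIn xs pvFG_audio := by
  rw [pvSumIn_cons]
  simp only [pvFG_audio, pvContains_range, decide_eq_true_eq]

theorem pvCnt_text (x : Int) (xs : List Int) :
    pvSumIn (x :: xs) pvFG_text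
      = (if 23 ≤ x ∧ x < 28 then (1:Int) else 0) + pvSumIn xs pvFG_text := by
  rw [pvSumIn_cons]
  simp only [pvFG_text, pvContains_range, decide_eq_true_eq]

theorem pvCnt_sentiment (x : Int) (xs : List Int) :
    pvSumIn (x :: xs) pvFG_sentiment
      = (if 28 ≤ x ∧ x < 30 then (1:Int) else 0) + pvSumIn xs pvFG_sentiment := by
  rw [pvSumIn_cons]
  simp only [pvFG_sentiment, pvContains_range, decide_eq_true_eq]

theorem pvCnt_embeddings (x : Int) (xs : List Int) :
    pvSumIn (x :: xs) pvFG_embeddings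
      = (if 30 ≤ x ∧ x < 414 then (1:Int) else 0) + pvSumIn xs pvFG_embeddings := by
  rw [pvSumIn_cons]
  simp only [pvFG_embeddings, pvContains_range, decide_eq_true_eq]

theorem pvFold_state (l : List Int) (a t s e : Int) :
    l.foldl pvStep (a, t, s, e)
    = (a + pvSumIn l pvFG_audio, t + pvSumIn l pvFG_text,
       s + pvSumIn l pvFG_sentiment, e + pvSumIn l pvFG_embeddings) := by
  induction l generalizing a t s e with
  | nil => simp [pvSumIn]
  | cons x xs ih =>
      rw [List.foldl_cons, pvCnt_audio, pvCnt_text, pvCnt_sentiment, pvCnt_embeddings]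
      by_cases c1 : 0 ≤ x ∧ x < 23
      · have n2 : ¬(23 ≤ x ∧ x < 28) := by omega
        have n3 : ¬(28 ≤ x ∧ x < 30) := by omega
        have n4 : ¬(30 ≤ x ∧ x < 414) := by omega
        rw [show pvStep (a, t, s, e) x = (a + 1, t, s, e) from by
          simp [pvStep, c1]]
        rw [ih]
        simp only [if_pos c1, if_neg n2, if_neg n3, if_neg n4, Prod.mk.injEq]
        refine ⟨by ring, by ring, by ring, by ring⟩
      · by_cases c2 : 23 ≤ x ∧ x < 28
        · have n3 : ¬(28 ≤ x ∧ x < 30) := by omega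
          have n4 : ¬(30 ≤ x ∧ x < 414) := by omega
          rw [show pvStep (a, t, s, e) x = (a, t + 1, s, e) from by
            simp [pvStep, c1, c2]]
          rw [ih]
          simp only [if_pos c2, if_neg c1, if_neg n3, if_neg n4, Prod.mk.injEq]
          refine ⟨by ring, by ring, by ring, by ring⟩
        · by_cases c3 : 28 ≤ x ∧ x < 30
          · have n4 : ¬(30 ≤ x ∧ x < 414) := by omega
            rw [show pvStep (a, t, s, e) x = (a, t, s + 1, e) from by
              simp [pvStep, c1, c2, c3]]
            rw [ih]
            simp only [if_pos c3, if_neg c1, if_neg c2, if_neg n4, Prod.mk.injEq]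
            refine ⟨by ring, by ring, by ring, by ring⟩
          · by_cases c4 : 30 ≤ x ∧ x < 414
            · rw [show pvStep (a, t, s, e) x = (a, t, s, e + 1) from by
                simp [pvStep, c1, c2, c3, c4]]
              rw [ih]
              simp only [if_pos c4, if_neg c1, if_neg c2, if_neg c3, Prod.mk.injEq]
              refine ⟨by ring, by ring, by ring, by ring⟩
            · rw [show pvStep (a, t, s, e) x = (a, t, s, e) from by
                simp [pvStep, c1, c2, c3, c4]]
              rw [ih]
              simp only [if_neg c1, if_neg c2, if_neg c3, if_neg c4, Prod.mk.injEq]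
              refine ⟨by ring, by ring, by ring, by ring⟩

-- ===== VERDICT (by name: the statement is the Claim_ definition above) =====
theorem analyze_feature_groups_spec : Claim_equal_analyze_feature_groups := by
  intro l _
  unfold Spec_analyze_feature_groups analyze_feature_groups analyze_feature_groups_alt
  rw [pvFold_state]
  simp
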